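-- pv_equiv track=rewrite | github.com/bitoku/rfcyaml | main.py | is_successive_section
-- ===== SOURCE A (Python) =====
-- def is_successive_section(latest, current) -> bool:
--     if len(latest) == 0 and len(current) == 0:
--         return True
--     latest_top = latest[0] if len(latest) > 0 else -1
--     current_top = current[0] if len(current) > 0 else -1
--     if latest_top > current_top:
--         return False
--     if latest_top < current_top:
--         return True
--     return is_successive_section(latest[1:], current[1:])
-- ===== SOURCE B (Python) =====
-- def is_successive_section(latest, current) -> bool:
--     for i in range(max(len(latest), len(current))):
--         a = latest[i] if i < len(latest) else -1
--         b = current[i] if i < len(current) else -1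
--         if a != b:
--             return a < b
--     return True
-- ===== Notes on version B (the rewrite author's own statement) =====
-- stated objective: faster
-- what changed: Replaces A's recursion on list slices (each call copies both tails, O(n^2) total) with a single index-based loop that pads missing positions with -1 and returns at the first unequal position, O(n) with no copying.
import Mathlib
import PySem

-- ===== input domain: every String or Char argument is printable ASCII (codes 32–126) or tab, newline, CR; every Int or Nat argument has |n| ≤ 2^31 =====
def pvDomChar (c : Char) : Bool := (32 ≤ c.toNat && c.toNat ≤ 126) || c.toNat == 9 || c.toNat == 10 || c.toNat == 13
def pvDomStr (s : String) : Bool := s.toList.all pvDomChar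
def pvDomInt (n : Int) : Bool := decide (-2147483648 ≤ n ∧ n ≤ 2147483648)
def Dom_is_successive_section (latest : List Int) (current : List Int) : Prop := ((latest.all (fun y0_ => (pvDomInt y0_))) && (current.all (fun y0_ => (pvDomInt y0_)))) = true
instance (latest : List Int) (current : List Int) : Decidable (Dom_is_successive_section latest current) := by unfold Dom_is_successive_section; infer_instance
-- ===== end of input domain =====

-- B replaces A's recursion on copied list slices with one index-based loop (objective: faster, asymptotic O(n) vs O(n^2)).

-- ===== PORT A =====
-- literal port of A: recursion on latest[1:] / current[1:] (PySem.List.slice)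
def is_successive_section (latest : List Int) (current : List Int) : Bool :=
  if latest.length = 0 ∧ current.length = 0 then true
  else
    let latest_top := if latest.length > 0 then latest.getD 0 0 else -1
    let current_top := if current.length > 0 then current.getD 0 0 else -1
    if latest_top > current_top then false
    else if latest_top < current_top then true
    else is_successive_section (PySem.List.slice latest (some 1) none)
                               (PySem.List.slice current (some 1) none)
termination_by latest.length + current.length
decreasing_by
  simp only [PySem.List.slice_from_one, List.length_tail]
  rename_i h _ _
  rcases latest with _ | ⟨x, l⟩ <;> rcases current with _ | ⟨y, c⟩ <;> simp_all <;> omega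

-- ===== PORT B =====
-- Source B's loop 'for i in range(max(len,len))' with early return, as index recursion
def altGo (latest : List Int) (current : List Int) (i : Nat) : Nat → Bool
  | 0 => true
  | fuel + 1 =>
    let a := if i < latest.length then latest.getD i 0 else -1
    let b := if i < current.length then current.getD i 0 else -1
    if a ≠ b then decide (a < b) else altGo latest current (i + 1) fuel

def is_successive_section_alt (latest : List Int) (current : List Int) : Bool :=
  altGo latest current 0 (max latest.length current.length)

-- ===== PRECONDITION & SPEC =====
def Spec_is_successive_section (latest : List Int) (current : List Int) (out : Bool) : Prop := out = is_successive_section_alt latest current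
instance (latest : List Int) (current : List Int) (out : Bool) : Decidable (Spec_is_successive_section latest current out) := by unfold Spec_is_successive_section; infer_instance

-- ===== CLAIM (what is proved, stated in full; the proofs are below) =====
def Claim_equal_is_successive_section : Prop := ∀ (latest : List Int) (current : List Int), Dom_is_successive_section latest current → Spec_is_successive_section latest current (is_successive_section latest current)

-- ===== LEMMAS AND PROOFS =====

-- the padded element at index i+1 of a list is the padded element at index i of its tail
theorem padGet_shift (l : List Int) (i : Nat) :
    (if i + 1 < l.length then l.getD (i + 1) 0 else -1)
      = (if i < l.tail.length then l.tail.getD i 0 else -1) := by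
  rcases l with _ | ⟨x, l⟩ <;> simp

-- shifting the loop index by one equals looping over the tails
theorem altGo_shift (l c : List Int) (i fuel : Nat) :
    altGo l c (i + 1) fuel = altGo l.tail c.tail i fuel := by
  induction fuel generalizing i with
  | zero => rfl
  | succ n ih =>
    simp only [altGo, padGet_shift, ih]

theorem main_eq (l c : List Int) :
    is_successive_section l c = altGo l c 0 (max l.length c.length) := by
  fun_induction is_successive_section l c with
  | case1 l c h =>
    obtain ⟨h1, h2⟩ := h
    simp [h1, h2, altGo]
  | case2 l c h lt ct hgt =>
    have hfuel : ∃ n, max l.length c.length = n + 1 := by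
      rcases l with _ | ⟨x, l⟩ <;> rcases c with _ | ⟨y, c⟩ <;> simp_all <;> omega
    obtain ⟨n, hn⟩ := hfuel
    simp only [hn, altGo]
    have : lt ≠ ct := by omega
    simp_all [lt, ct]
    omega
  | case3 l c h lt ct hgt hlt =>
    have hfuel : ∃ n, max l.length c.length = n + 1 := by
      rcases l with _ | ⟨x, l⟩ <;> rcases c with _ | ⟨y, c⟩ <;> simp_all <;> omega
    obtain ⟨n, hn⟩ := hfuel
    simp only [hn, altGo]
    simp_all [lt, ct]
    omega
  | case4 l c h lt ct hgt hlt ih =>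
    have hlc : lt = ct := by omega
    have heq : (if 0 < l.length then l.getD 0 0 else -1) = (if 0 < c.length then c.getD 0 0 else -1) := by
      simpa [lt, ct] using hlc
    have hfuel : max l.length c.length = max l.tail.length c.tail.length + 1 := by
      rcases l with _ | ⟨x, l⟩ <;> rcases c with _ | ⟨y, c⟩ <;> simp_all <;> omega
    simp only [hfuel, altGo]
    rw [if_neg (by simp [lt, ct]; exact heq)]
    rw [altGo_shift]
    simpa [PySem.List.slice_from_one] using ih

-- ===== VERDICT (by name: the statement is the Claim_ definition above) =====
theorem is_successive_section_spec : Claim_equal_is_successive_section := by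
  intro l c _
  unfold Spec_is_successive_section is_successive_section_alt
  exact main_eq l c
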